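-- pv_equiv track=rewrite | github.com/lucalazengo/SPRINT-III---nathor | app/app_2.py | calculate_cost_v2
-- ===== SOURCE A (Python) =====
-- SETUP_TIME_COR = 15
--
-- SETUP_TIME_PECA = 3
--
-- def calculate_cost_v2(sequence, initial_item=None):
--     """Calcula o custo total de setup (cor e peça) de uma sequência."""
--     if not sequence:
--         return 0
--     total_setup_cost = 0
--     current_item = initial_item
--     if current_item is not None:
--         next_item = sequence[0]
--         if current_item['Tinta'] != next_item['Tinta']:
--             total_setup_cost += SETUP_TIME_COR
--         if current_item['CODIGO_COMPONENTE'] != next_item['CODIGO_COMPONENTE']: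
--             total_setup_cost += SETUP_TIME_PECA
--     for i in range(len(sequence) - 1):
--         current_item = sequence[i]
--         next_item = sequence[i+1]
--         if current_item['Tinta'] != next_item['Tinta']:
--             total_setup_cost += SETUP_TIME_COR
--         if current_item['CODIGO_COMPONENTE'] != next_item['CODIGO_COMPONENTE']:
--             total_setup_cost += SETUP_TIME_PECA
--     return total_setup_cost
-- ===== SOURCE B (Python) =====
-- SETUP_TIME_COR = 15
--
-- SETUP_TIME_PECA = 3
--
-- def calculate_cost_v2(sequence, initial_item=None):
--     """Staged per-attribute passes: project each attribute to its value list,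
--     count runs of equal values, and charge weight * (runs - 1) run boundaries."""
--     if not sequence:
--         return 0
--     items = ([initial_item] if initial_item is not None else []) + sequence
--     if len(items) < 2:
--         return 0
--     total = 0
--     for key, weight in (('Tinta', SETUP_TIME_COR), ('CODIGO_COMPONENTE', SETUP_TIME_PECA)):
--         vals = [item[key] for item in items]
--         runs, prev, first = 0, None, True
--         for v in vals:
--             if first or v != prev:
--                 runs += 1
--             prev, first = v, False
--         total += weight * (runs - 1)
--     return total
-- ===== Notes on version B (the rewrite author's own statement) =====
-- stated objective: alternative
-- what changed: Instead of A's per-pair conditional adds (initial-item preamble plus index loop), B makes one staged pass per attribute: it projects the attribute values (with the optional initial item prepended), counts runs of equal consecutive values, and charges weight * (runs - 1) boundaries per attribute.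
import Mathlib
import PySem

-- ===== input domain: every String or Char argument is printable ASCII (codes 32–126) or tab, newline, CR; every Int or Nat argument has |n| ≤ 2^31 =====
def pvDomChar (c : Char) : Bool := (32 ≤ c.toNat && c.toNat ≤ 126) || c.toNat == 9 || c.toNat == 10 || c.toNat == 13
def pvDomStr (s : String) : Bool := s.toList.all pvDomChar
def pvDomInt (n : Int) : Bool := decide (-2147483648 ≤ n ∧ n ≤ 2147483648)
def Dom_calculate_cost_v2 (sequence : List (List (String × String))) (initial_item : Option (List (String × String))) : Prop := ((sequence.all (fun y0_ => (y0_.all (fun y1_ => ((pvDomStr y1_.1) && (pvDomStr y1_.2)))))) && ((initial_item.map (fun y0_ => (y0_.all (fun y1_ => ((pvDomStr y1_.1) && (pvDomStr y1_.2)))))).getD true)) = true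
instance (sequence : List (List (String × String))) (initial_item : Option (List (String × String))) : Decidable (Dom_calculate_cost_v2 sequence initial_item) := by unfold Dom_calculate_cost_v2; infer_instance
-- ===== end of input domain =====

-- B replaces A's per-pair conditional adds with one staged pass per attribute: project the
-- attribute values and charge weight * (number of runs of equal values - 1); objective: alternative.

-- d['Tinta'] etc. (both programs): dict lookup with a default "" — Pre_ guarantees the key
-- is present wherever either program actually accesses it
def pvGet (d : List (String × String)) (k : String) : String :=
  ((PySem.Dict.mk d).get? k).getD ""

-- ===== PORT A =====
def calculate_cost_v2 (sequence : List (List (String × String))) (initial_item : Option (List (String × String))) : Int :=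
  if sequence = [] then 0
  else
    let total0 : Int := 0
    -- 'if current_item is not None: …' preamble on sequence[0]
    let total1 : Int :=
      match initial_item with
      | none => total0
      | some current_item =>
        let next_item := (PySem.List.pyGet? sequence 0).getD []   -- in range: sequence ≠ []
        (total0 + (if pvGet current_item "Tinta" ≠ pvGet next_item "Tinta" then 15 else 0))
          + (if pvGet current_item "CODIGO_COMPONENTE" ≠ pvGet next_item "CODIGO_COMPONENTE" then 3 else 0)
    -- for i in range(len(sequence) - 1): …
    (PySem.List.pyRange 0 ((PySem.List.len sequence) - 1) 1).foldl
      (fun acc i =>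
        let current_item := PySem.List.pyGetD sequence i []
        let next_item := PySem.List.pyGetD sequence (i + 1) []
        (acc + (if pvGet current_item "Tinta" ≠ pvGet next_item "Tinta" then 15 else 0))
          + (if pvGet current_item "CODIGO_COMPONENTE" ≠ pvGet next_item "CODIGO_COMPONENTE" then 3 else 0))
      total1

-- ===== PORT B =====
-- the body of B's inner loop: state (runs, prev, first), 'if first or v != prev: runs += 1'
def pvRunStep {α : Type} [DecidableEq α] (st : Int × Option α × Bool) (v : α) : Int × Option α × Bool :=
  if st.2.2 = true ∨ some v ≠ st.2.1 then (st.1 + 1, some v, false) else (st.1, some v, false)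

-- B's inner loop: number of runs of equal consecutive values
def pvCountRuns {α : Type} [DecidableEq α] (vals : List α) : Int :=
  (vals.foldl pvRunStep (0, none, true)).1

def calculate_cost_v2_alt (sequence : List (List (String × String))) (initial_item : Option (List (String × String))) : Int :=
  if sequence = [] then 0
  else
    let items := (match initial_item with | some d => [d] | none => []) ++ sequence
    if items.length < 2 then 0
    else
      ([("Tinta", (15 : Int)), ("CODIGO_COMPONENTE", (3 : Int))]).foldl
        (fun total kw =>
          let vals := items.map (fun it => pvGet it kw.1)
          total + kw.2 * (pvCountRuns vals - 1))
        0

-- ===== PRECONDITION & SPEC =====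
def pvHasKeys (d : List (String × String)) : Bool :=
  (PySem.Dict.mk d).contains "Tinta" && (PySem.Dict.mk d).contains "CODIGO_COMPONENTE"

-- Pre_ excludes exactly the inputs on which A raises KeyError: a dict actually accessed
-- (every sequence item when len ≥ 2; initial_item and sequence[0] when initial_item is given
-- and sequence nonempty) missing 'Tinta' or 'CODIGO_COMPONENTE'.
def Pre_calculate_cost_v2 (sequence : List (List (String × String))) (initial_item : Option (List (String × String))) : Prop :=
  (2 ≤ sequence.length → ∀ d ∈ sequence, pvHasKeys d = true) ∧
  (sequence ≠ [] → ∀ d ∈ initial_item, pvHasKeys d = true ∧ ∀ h ∈ sequence.head?, pvHasKeys h = true)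
instance (sequence : List (List (String × String))) (initial_item : Option (List (String × String))) : Decidable (Pre_calculate_cost_v2 sequence initial_item) := by unfold Pre_calculate_cost_v2; infer_instance

def pvWitness_calculate_cost_v2 : (List (List (String × String))) × (Option (List (String × String))) :=
  ([[("Tinta", "azul"), ("CODIGO_COMPONENTE", "c1")], [("Tinta", "rojo"), ("CODIGO_COMPONENTE", "c1")]],
   some [("Tinta", "azul"), ("CODIGO_COMPONENTE", "c2")])

def Spec_calculate_cost_v2 (sequence : List (List (String × String))) (initial_item : Option (List (String × String))) (out : Int) : Prop := out = calculate_cost_v2_alt sequence initial_item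
instance (sequence : List (List (String × String))) (initial_item : Option (List (String × String))) (out : Int) : Decidable (Spec_calculate_cost_v2 sequence initial_item out) := by unfold Spec_calculate_cost_v2; infer_instance

-- ===== CLAIM (what is proved, stated in full; the proofs are below) =====
def Claim_equal_calculate_cost_v2 : Prop := ∀ (sequence : List (List (String × String))) (initial_item : Option (List (String × String))), Dom_calculate_cost_v2 sequence initial_item → Pre_calculate_cost_v2 sequence initial_item → Spec_calculate_cost_v2 sequence initial_item (calculate_cost_v2 sequence initial_item)

-- ===== LEMMAS AND PROOFS =====

-- number of adjacent unequal pairs in a value list (proof-side characterisation)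
def pvChg {α : Type} [DecidableEq α] (vals : List α) : Int :=
  ((vals.zip vals.tail).map (fun p => if p.1 ≠ p.2 then (1 : Int) else 0)).sum

-- cost contributed by one adjacent pair (proof-side; A's loop body)
def pvStep (a b : List (String × String)) : Int :=
  (if pvGet a "Tinta" ≠ pvGet b "Tinta" then 15 else 0)
    + (if pvGet a "CODIGO_COMPONENTE" ≠ pvGet b "CODIGO_COMPONENTE" then 3 else 0)

-- A's index loop over range(len-1) equals the sum over adjacent pairs (zip xs xs.tail)
theorem loop_eq_zip_sum (xs : List (List (String × String))) (c : Int) :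
    (PySem.List.pyRange 0 ((PySem.List.len xs) - 1) 1).foldl
      (fun acc i =>
        (acc + (if pvGet (PySem.List.pyGetD xs i []) "Tinta" ≠ pvGet (PySem.List.pyGetD xs (i + 1) []) "Tinta" then 15 else 0))
          + (if pvGet (PySem.List.pyGetD xs i []) "CODIGO_COMPONENTE" ≠ pvGet (PySem.List.pyGetD xs (i + 1) []) "CODIGO_COMPONENTE" then 3 else 0))
      c
    = c + ((xs.zip xs.tail).map (fun p => pvStep p.1 p.2)).sum := by
  rcases xs with _ | ⟨a, ys⟩
  · rw [PySem.List.pyRange_one_eq_nil (by simp)]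
    simp
  · set xs := a :: ys with hxs
    set zs := xs.zip xs.tail with hz
    have hzlen : zs.length = xs.length - 1 := by
      simp [hz, List.length_zip, hxs]
    have hxpos : 1 ≤ xs.length := by simp [hxs]
    have hlen : (PySem.List.len xs) - 1 = ((zs.length : Int)) := by
      simp [PySem.List.len_eq, hzlen]
      omega
    have h1 : (PySem.List.pyRange 0 ((PySem.List.len xs) - 1) 1).foldl
        (fun acc i =>
          (acc + (if pvGet (PySem.List.pyGetD xs i []) "Tinta" ≠ pvGet (PySem.List.pyGetD xs (i + 1) []) "Tinta" then 15 else 0))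
            + (if pvGet (PySem.List.pyGetD xs i []) "CODIGO_COMPONENTE" ≠ pvGet (PySem.List.pyGetD xs (i + 1) []) "CODIGO_COMPONENTE" then 3 else 0))
        c
        = zs.foldl (fun acc p => acc + pvStep p.1 p.2) c := by
      rw [← PySem.List.foldl_pyRange_zero_pyGetD' zs ([], []) (fun acc p => acc + pvStep p.1 p.2) c, hlen]
      apply PySem.List.foldl_congr_mem
      intro acc i hi
      rw [PySem.List.mem_pyRange_one] at hi
      obtain ⟨h0, hlt⟩ := hi
      obtain ⟨k, rfl⟩ : ∃ k : ℕ, i = (k : Int) := ⟨i.toNat, (Int.toNat_of_nonneg h0).symm⟩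
      have hklt : k < zs.length := by exact_mod_cast hlt
      have hk1 : k + 1 < xs.length := by omega
      have hk0 : k < xs.length := by omega
      have e1 : PySem.List.pyGetD xs (k : Int) [] = xs[k] := by
        simp [List.getElem?_eq_getElem hk0]
      have e2 : PySem.List.pyGetD xs ((k : Int) + 1) [] = xs[k + 1] := by
        have : ((k : Int) + 1) = ((k + 1 : ℕ) : Int) := by push_cast; ring
        rw [this, PySem.List.pyGetD_natCast]
        simp only [List.getD_eq_getElem?_getD, List.getElem?_eq_getElem hk1, Option.getD_some]
      have e3 : PySem.List.pyGetD zs (k : Int) ([], []) = (xs[k], xs[k + 1]) := by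
        have htl : k < xs.tail.length := by simp [hxs] at hzlen ⊢; omega
        rw [hz]
        simp [List.getElem?_eq_getElem (hz ▸ hklt), List.getElem_zip, List.getElem_tail]
      rw [e1, e2, e3]
      simp [pvStep, add_assoc]
    rw [h1, PySem.List.foldl_add]

-- B's run-counting loop from a running state equals runs-so-far plus adjacent changes
theorem runStep_foldl {α : Type} [DecidableEq α] (vals : List α) : ∀ (p : α) (runs : Int),
    (vals.foldl pvRunStep (runs, some p, false)).1 = runs + pvChg (p :: vals) := by
  induction vals with
  | nil => intro p runs; simp [pvChg]
  | cons v rest ih =>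
    intro p runs
    by_cases h : v = p
    · subst h
      simp only [List.foldl_cons, pvRunStep]
      rw [if_neg (by simp)]
      rw [ih v runs]
      simp [pvChg]
    · have hne : ¬ p = v := fun hh => h hh.symm
      simp only [List.foldl_cons, pvRunStep]
      rw [if_pos (Or.inr (by simpa using h))]
      rw [ih v (runs + 1)]
      simp [pvChg, hne]
      ring

-- for a nonempty value list, runs - 1 = number of adjacent changes
theorem countRuns_sub_one {α : Type} [DecidableEq α] (v : α) (rest : List α) :
    pvCountRuns (v :: rest) - 1 = pvChg (v :: rest) := by
  unfold pvCountRuns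
  simp only [List.foldl_cons, pvRunStep]
  rw [if_pos (Or.inl trivial)]
  rw [runStep_foldl rest v (0 + 1)]
  omega

-- the adjacent-pair cost sum splits into weighted per-attribute change counts
theorem zip_sum_split (items : List (List (String × String))) :
    ((items.zip items.tail).map (fun p => pvStep p.1 p.2)).sum
      = 15 * pvChg (items.map (fun it => pvGet it "Tinta"))
        + 3 * pvChg (items.map (fun it => pvGet it "CODIGO_COMPONENTE")) := by
  induction items with
  | nil => simp [pvChg]
  | cons a rest ih =>
    rcases rest with _ | ⟨b, rs⟩
    · simp [pvChg]
    · simp only [List.zip_cons_cons, List.tail_cons, List.map_cons, List.sum_cons] at ih ⊢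
      rw [ih]
      show pvStep a b + _ = _
      simp only [pvChg, List.tail_cons, List.map_cons, List.zip_cons_cons, List.sum_cons, pvStep]
      split_ifs <;> ring

-- ===== VERDICT (by name: the statement is the Claim_ definition above) =====
theorem calculate_cost_v2_spec : Claim_equal_calculate_cost_v2 := by
  intro sequence initial_item _hdom _hpre
  unfold Spec_calculate_cost_v2 calculate_cost_v2 calculate_cost_v2_alt
  rcases sequence with _ | ⟨x, rest⟩
  · simp
  · rw [if_neg (by simp), if_neg (by simp)]
    rcases initial_item with _ | d
    · rcases rest with _ | ⟨y, ys⟩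
      · -- single item, no initial item: no pair on either side
        rw [loop_eq_zip_sum]
        simp
      · rw [if_neg (by simp)]
        simp only [List.foldl_cons, List.foldl_nil]
        rw [loop_eq_zip_sum, zip_sum_split]
        simp only [List.nil_append, List.map_cons]
        rw [countRuns_sub_one, countRuns_sub_one]
        ring
    · rw [if_neg (by simp)]
      simp only [List.foldl_cons, List.foldl_nil]
      rw [loop_eq_zip_sum]
      -- A's preamble equals the pair cost pvStep d x
      have hA : (0 + (if pvGet d "Tinta" ≠ pvGet ((PySem.List.pyGet? (x :: rest) 0).getD []) "Tinta" then (15:Int) else 0))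
            + (if pvGet d "CODIGO_COMPONENTE" ≠ pvGet ((PySem.List.pyGet? (x :: rest) 0).getD []) "CODIGO_COMPONENTE" then 3 else 0)
          = pvStep d x := by
        simp [pvStep, PySem.List.pyGet?, PySem.List.pyIdx?]
      rw [hA]
      -- fold the preamble into the pair sum over d :: x :: rest, then split per attribute
      rw [show ((x :: rest).zip (x :: rest).tail) = ((x :: rest).zip rest) from rfl]
      rw [show (pvStep d x + (((x :: rest).zip rest).map (fun p => pvStep p.1 p.2)).sum)
            = (((d :: x :: rest).zip (x :: rest)).map (fun p => pvStep p.1 p.2)).sum by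
        simp [List.zip_cons_cons]]
      have hsplit := zip_sum_split (d :: x :: rest)
      rw [show ((d :: x :: rest).zip (d :: x :: rest).tail) = ((d :: x :: rest).zip (x :: rest)) from rfl] at hsplit
      rw [hsplit]
      simp only [List.singleton_append, List.map_cons]
      rw [countRuns_sub_one, countRuns_sub_one]
      ring
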